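-- pv_equiv track=rewrite | github.com/Dani2044/First-order-resolution-engine | source/read.py | _find_conn
-- ===== SOURCE A (Python) =====
-- def _find_conn(s, conn):
--     depth = 0
--     i = 0
--     while i < len(s):
--         ch = s[i]
--         if ch == '(':
--             depth += 1
--         elif ch == ')':
--             depth -= 1
--         if depth == 0 and s.startswith(conn, i):
--             return i
--         i += 1
--     return -1
-- ===== SOURCE B (Python) =====
-- def _find_conn(s, conn):
--     n = len(s)
--     start = 0
--     while True:
--         i = s.find(conn, start)
--         if i < 0 or i >= n:
--             return -1
--         if s[:i + 1].count('(') == s[:i + 1].count(')'):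
--             return i
--         start = i + 1
-- ===== Notes on version B (the rewrite author's own statement) =====
-- stated objective: faster
-- what changed: B abandons A's per-character Python loop with a running depth counter: it uses str.find to jump directly between occurrences of conn and tests balance at each candidate by comparing the counts of '(' and ')' in the prefix s[:i+1], returning the first balanced candidate.
import Mathlib
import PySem

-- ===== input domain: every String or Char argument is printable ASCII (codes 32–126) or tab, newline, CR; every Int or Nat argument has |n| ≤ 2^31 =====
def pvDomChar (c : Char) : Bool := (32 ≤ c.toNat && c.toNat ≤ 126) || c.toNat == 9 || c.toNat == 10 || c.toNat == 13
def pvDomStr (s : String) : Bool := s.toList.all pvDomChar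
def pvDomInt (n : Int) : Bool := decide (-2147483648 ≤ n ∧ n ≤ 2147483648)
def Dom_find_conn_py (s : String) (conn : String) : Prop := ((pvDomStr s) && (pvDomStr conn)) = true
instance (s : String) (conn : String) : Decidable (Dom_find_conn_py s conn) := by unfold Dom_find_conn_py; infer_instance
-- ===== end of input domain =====

-- B replaces A's per-character scan with a running depth by str.find jumps between
-- occurrences of conn, testing balance at each candidate by counting parentheses in the
-- prefix; measurably faster since find/count run in C instead of a per-character Python loop.

-- ===== PORT A =====
-- A's while-loop: index i, running depth; depth updated before the check.
def findConnLoopA (cs conn : List Char) (i : Nat) (depth : Int) : Int :=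
  if h : i < cs.length then
    let ch := cs[i]
    let depth' := if ch = '(' then depth + 1 else if ch = ')' then depth - 1 else depth
    if depth' = 0 ∧ conn.isPrefixOf (cs.drop i) then (i : Int)
    else findConnLoopA cs conn (i + 1) depth'
  else -1
termination_by cs.length - i

def find_conn_py (s : String) (conn : String) : Int :=
  findConnLoopA s.toList conn.toList 0 0

-- ===== PORT B =====
-- needed by the port's decreasing_by: s.find(sub, start) past the end is -1
lemma pvFindFrom_past_len (s sub : List Char) (k : Nat) (h : s.length < k) :
    PySem.Chars.findFrom s sub k = -1 := by
  simp only [PySem.Chars.findFrom]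
  rw [if_neg (by omega : ¬ ((k:Int) < 0)), if_pos (by exact_mod_cast h)]

-- B's loop: jump to the next occurrence of conn with find, test the count condition there.
def findConnLoopB (cs conn : List Char) (start : Nat) : Int :=
  let i := PySem.Chars.findFrom cs conn (start : Int)
  if h : i < 0 ∨ (cs.length : Int) ≤ i then -1
  else if PySem.Chars.count (PySem.List.slice cs none (some (i + 1))) ['('] =
          PySem.Chars.count (PySem.List.slice cs none (some (i + 1))) [')'] then i
  else findConnLoopB cs conn (i.toNat + 1)
termination_by cs.length + 1 - start
decreasing_by
  push_neg at h
  rcases le_or_gt start cs.length with hk | hk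
  · have hs := PySem.Chars.findFrom_natCast_spec cs conn start hk (by omega)
    have h1 : (start : Int) ≤ PySem.Chars.findFrom cs conn (start : Int) := hs.1
    omega
  · have := pvFindFrom_past_len cs conn start hk
    omega

def find_conn_py_alt (s : String) (conn : String) : Int :=
  findConnLoopB s.toList conn.toList 0

-- ===== PRECONDITION & SPEC =====
def Spec_find_conn_py (s : String) (conn : String) (out : Int) : Prop := out = find_conn_py_alt s conn
instance (s : String) (conn : String) (out : Int) : Decidable (Spec_find_conn_py s conn out) := by unfold Spec_find_conn_py; infer_instance

-- ===== CLAIM (what is proved, stated in full; the proofs are below) =====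
def Claim_equal_find_conn_py : Prop := ∀ (s : String) (conn : String), Dom_find_conn_py s conn → Spec_find_conn_py s conn (find_conn_py s conn)

-- ===== LEMMAS AND PROOFS =====

-- Chars.count with a single-character needle is List.count
lemma pvCountGo_singleton (c : Char) (xs : List Char) (fuel acc : Nat) (h : xs.length ≤ fuel) :
    PySem.Chars.count.go [c] fuel xs acc = acc + xs.count c := by
  induction xs generalizing fuel acc with
  | nil => cases fuel <;> simp [PySem.Chars.count.go]
  | cons x t ih =>
    cases fuel with
    | zero => simp at h
    | succ f =>
      have step : PySem.Chars.count.go [c] (f + 1) (x :: t) acc =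
          if [c].isPrefixOf (x :: t) then PySem.Chars.count.go [c] f t (acc + 1)
          else PySem.Chars.count.go [c] f t acc := by
        simp only [PySem.Chars.count.go]
        rfl
      rw [step]
      simp only [List.length_cons, Nat.add_le_add_iff_right] at h
      by_cases hx : c = x
      · rw [if_pos (by simp [hx, List.isPrefixOf]), ih f (acc + 1) h, List.count_cons]
        simp [hx]
        omega
      · rw [if_neg (by simp [List.isPrefixOf, hx]), ih f acc h, List.count_cons]
        simp [Ne.symm hx]

lemma pvCount_singleton (c : Char) (xs : List Char) :
    PySem.Chars.count xs [c] = xs.count c := by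
  simpa [PySem.Chars.count] using pvCountGo_singleton c xs xs.length 0 le_rfl

-- common linear-scan reference
def pvLin (cs conn : List Char) (i : Nat) : Int :=
  if h : i < cs.length then
    if ((cs.take (i + 1)).count '(' = (cs.take (i + 1)).count ')') ∧ conn.isPrefixOf (cs.drop i)
    then (i : Int) else pvLin cs conn (i + 1)
  else -1
termination_by cs.length - i

lemma pvA_eq_lin (cs conn : List Char) (i : Nat) :
    findConnLoopA cs conn i (((cs.take i).count '(' : Int) - ((cs.take i).count ')' : Int)) =
      pvLin cs conn i := by
  by_cases h : i < cs.length
  · rw [findConnLoopA, pvLin, dif_pos h, dif_pos h]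
    have e : cs.take (i + 1) = cs.take i ++ [cs[i]] := by
      rw [List.take_add_one]; simp [List.getElem?_eq_getElem h]
    have hd : (if cs[i] = '(' then ((cs.take i).count '(' : Int) - ((cs.take i).count ')' : Int) + 1
        else if cs[i] = ')' then ((cs.take i).count '(' : Int) - ((cs.take i).count ')' : Int) - 1
        else ((cs.take i).count '(' : Int) - ((cs.take i).count ')' : Int)) =
        ((cs.take (i + 1)).count '(' : Int) - ((cs.take (i + 1)).count ')' : Int) := by
      rw [e, List.count_append, List.count_append]
      by_cases h1 : cs[i] = '(' <;> by_cases h2 : cs[i] = ')' <;>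
        simp [h1, h2, List.count_singleton] <;> omega
    simp only [hd]
    have hz : (((cs.take (i + 1)).count '(' : Int) - ((cs.take (i + 1)).count ')' : Int) = 0) ↔
        ((cs.take (i + 1)).count '(' = (cs.take (i + 1)).count ')') := by omega
    by_cases hc : ((cs.take (i + 1)).count '(' = (cs.take (i + 1)).count ')') ∧
        conn.isPrefixOf (cs.drop i)
    · rw [if_pos (by exact ⟨hz.mpr hc.1, hc.2⟩), if_pos hc]
    · rw [if_neg (by rintro ⟨hh1, hh2⟩; exact hc ⟨hz.mp hh1, hh2⟩), if_neg hc]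
      exact pvA_eq_lin cs conn (i + 1)
  · rw [findConnLoopA, pvLin, dif_neg h, dif_neg h]
termination_by cs.length - i

lemma pvLin_skip (cs conn : List Char) (a b : Nat) (hab : a ≤ b) (hb : b ≤ cs.length)
    (hno : ∀ j, a ≤ j → j < b → ¬ conn <+: cs.drop j) :
    pvLin cs conn a = pvLin cs conn b := by
  rcases Nat.eq_or_lt_of_le hab with rfl | hlt
  · rfl
  · have ha : a < cs.length := by omega
    rw [pvLin, dif_pos ha, if_neg]
    · exact pvLin_skip cs conn (a + 1) b hlt hb (fun j h1 h2 => hno j (by omega) h2)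
    · rintro ⟨-, hp⟩
      exact hno a le_rfl hlt (List.isPrefixOf_iff_prefix.mp hp)
termination_by b - a

lemma pvB_eq_lin (cs conn : List Char) (start : Nat) :
    findConnLoopB cs conn start = pvLin cs conn start := by
  rcases le_or_gt start cs.length with hk | hk
  · have hnc := PySem.Chars.findFrom_natCast cs conn start hk
    by_cases hneg : PySem.Chars.findFrom cs conn (start : Int) = -1
    · -- no occurrence from start on: both -1
      rw [findConnLoopB, dif_pos (by omega)]
      have hninf : ¬ conn <:+: cs.drop start :=
        (PySem.Chars.findFrom_natCast_eq_neg_one_iff cs conn start hk).mp hneg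
      rw [pvLin_skip cs conn start cs.length hk le_rfl ?_, pvLin, dif_neg (by omega)]
      intro j h1 h2 hp
      exact hninf ((hp.isInfix).trans (by
        have : cs.drop j = (cs.drop start).drop (j - start) := by
          rw [List.drop_drop]; congr 1; omega
        rw [this]; exact (List.drop_suffix _ _).isInfix))
    · obtain ⟨h1, h2, h3⟩ := PySem.Chars.findFrom_natCast_spec cs conn start hk hneg
      set i := PySem.Chars.findFrom cs conn (start : Int) with hi
      have hi0 : 0 ≤ i := by omega
      by_cases hlen : (cs.length : Int) ≤ i
      · -- candidate at/after the end: only possible for conn = '' at start = len; both -1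
        rw [findConnLoopB]
        simp only [← hi]
        rw [dif_pos (Or.inr hlen)]
        have hconn : conn = [] := by
          have hnil : cs.drop i.toNat = [] := List.drop_eq_nil_of_le (by omega)
          exact List.prefix_nil.mp (hnil ▸ h2)
        have hstart : start = cs.length := by
          by_contra hne
          exact h3 start le_rfl (by omega) (hconn ▸ List.nil_prefix)
        rw [pvLin, dif_neg (by omega)]
      have hilen : i.toNat < cs.length := by omega
      rw [findConnLoopB]
      simp only [← hi]
      rw [dif_neg (by push_neg; constructor <;> omega)]
      have hskip : pvLin cs conn start = pvLin cs conn i.toNat :=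
        pvLin_skip cs conn start i.toNat (by omega) (by omega)
          (fun j hj1 hj2 => h3 j hj1 hj2)
      have hslice : PySem.List.slice cs none (some (i + 1)) = cs.take (i.toNat + 1) := by
        rw [PySem.List.slice_to cs (by omega)]; congr 1; omega
      rw [hslice, pvCount_singleton, pvCount_singleton]
      rw [hskip, pvLin, dif_pos hilen]
      by_cases hc : (cs.take (i.toNat + 1)).count '(' = (cs.take (i.toNat + 1)).count ')'
      · rw [if_pos hc, if_pos ⟨hc, List.isPrefixOf_iff_prefix.mpr h2⟩]
        omega
      · rw [if_neg hc, if_neg (by rintro ⟨h', -⟩; exact hc h')]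
        exact pvB_eq_lin cs conn (i.toNat + 1)
  · -- start past the end: find gives -1, both return -1
    rw [findConnLoopB, dif_pos (by rw [pvFindFrom_past_len cs conn start hk]; left; omega),
      pvLin, dif_neg (by omega)]
termination_by cs.length + 1 - start
decreasing_by omega

-- ===== VERDICT (by name: the statement is the Claim_ definition above) =====
theorem find_conn_py_spec : Claim_equal_find_conn_py := by
  intro s conn _
  unfold Spec_find_conn_py find_conn_py find_conn_py_alt
  rw [pvB_eq_lin]
  simpa using pvA_eq_lin s.toList conn.toList 0
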